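-- pv_equiv track=rewrite | github.com/aceiii/advent-of-code-2023 | python/day01.py | calibration_value2
-- ===== SOURCE A (Python) =====
-- import string
--
-- digit_names = ['one', 'two', 'three', 'four', 'five', 'six', 'seven', 'eight', 'nine']
--
-- def calibration_value2(line):
--     line = line.strip()
--     digits = []
--     for idx in range(len(line)):
--         char = line[idx]
--         if char in string.digits:
--             digits.append(int(char, 10))
--             continue
--
--         rest = line[idx:idx + 5]
--         for n, digit in enumerate(digit_names):
--             if rest.find(digit) == 0:
--                 digits.append(n + 1)
--                 break
--     return digits[0] * 10 + digits[-1]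
-- ===== SOURCE B (Python) =====
-- digit_names = ['one', 'two', 'three', 'four', 'five', 'six', 'seven', 'eight', 'nine']
--
-- def _digit_at(s, i):
--     c = s[i]
--     if '0' <= c <= '9':
--         return ord(c) - 48
--     for n, name in enumerate(digit_names):
--         if s.startswith(name, i):
--             return n + 1
--     return None
--
-- def calibration_value2(line):
--     s = line.strip()
--     first = last = None
--     for i in range(len(s)):
--         d = _digit_at(s, i)
--         if d is not None:
--             first = d
--             break
--     for i in range(len(s) - 1, -1, -1):
--         d = _digit_at(s, i)
--         if d is not None:
--             last = d
--             break
--     return first * 10 + last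
-- ===== Notes on version B (the rewrite author's own statement) =====
-- stated objective: alternative
-- what changed: B replaces A's full accumulation of every digit on the line with two early-exit scans (left-to-right for the first digit, right-to-left for the last) that stop at the first match, using a shared digit-at-index helper with startswith instead of A's list-building loop with find on a 5-char slice; Pre_ excludes lines with no digit at all, on which A raises IndexError.
import Mathlib
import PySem

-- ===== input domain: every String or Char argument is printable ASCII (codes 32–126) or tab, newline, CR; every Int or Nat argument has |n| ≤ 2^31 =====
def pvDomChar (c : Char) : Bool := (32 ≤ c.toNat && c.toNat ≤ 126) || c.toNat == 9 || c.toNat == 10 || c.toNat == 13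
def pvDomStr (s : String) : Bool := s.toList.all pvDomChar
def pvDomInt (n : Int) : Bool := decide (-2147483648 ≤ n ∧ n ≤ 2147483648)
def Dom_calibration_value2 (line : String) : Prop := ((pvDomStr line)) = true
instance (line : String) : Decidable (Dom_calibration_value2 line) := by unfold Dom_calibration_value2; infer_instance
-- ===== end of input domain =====

-- B replaces A's accumulation of ALL digits with two early-exit scans (first from the left,
-- last from the right) sharing one digit-at-index helper; equal on lines containing a digit.

-- ===== PORT A =====
def pvDigitNames : List (List Char) :=
  [['o','n','e'], ['t','w','o'], ['t','h','r','e','e'], ['f','o','u','r'], ['f','i','v','e'],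
   ['s','i','x'], ['s','e','v','e','n'], ['e','i','g','h','t'], ['n','i','n','e']]

def pvStringDigits : List Char := ['0','1','2','3','4','5','6','7','8','9']

-- 'for n, digit in enumerate(digit_names): if rest.find(digit) == 0: … break'
def pvInnerA : List (Int × List Char) → List Char → Option Int
  | [], _ => none
  | (n, digit) :: tl, rest =>
      if PySem.Chars.find rest digit = 0 then some (n + 1) else pvInnerA tl rest

def calibration_value2 (line : String) : Int :=
  let cs := PySem.Chars.strip line.toList
  let digits := (List.range cs.length).foldl (fun (digits : List Int) (idx : Nat) =>
    let char := (PySem.List.pyGet? cs (idx : Int)).getD ' '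
    if pvStringDigits.contains char then
      digits ++ [((char.toNat : Int) - 48)]
    else
      let rest := PySem.List.slice cs (some (idx : Int)) (some ((idx : Int) + 5))
      match pvInnerA (PySem.List.enumerate pvDigitNames 0) rest with
      | some d => digits ++ [d]
      | none => digits) ([] : List Int)
  (PySem.List.pyGet? digits 0).getD 0 * 10 + (PySem.List.pyGet? digits (-1)).getD 0

-- ===== PORT B =====
-- 'for n, name in enumerate(digit_names): if s.startswith(name, i): return n + 1'
def pvFindName : Int → List (List Char) → List Char → Option Int
  | _, [], _ => none
  | v, name :: tl, suffix =>
      if PySem.Chars.startswith suffix name then some v else pvFindName (v + 1) tl suffix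

def pvDigitAt (cs : List Char) (i : Nat) : Option Int :=
  let c := (PySem.List.pyGet? cs (i : Int)).getD ' '
  if '0' ≤ c ∧ c ≤ '9' then some ((c.toNat : Int) - 48)
  else pvFindName 1 pvDigitNames (cs.drop i)

def calibration_value2_alt (line : String) : Int :=
  let cs := PySem.Chars.strip line.toList
  let first := (List.range cs.length).findSome? (pvDigitAt cs)
  let last := (List.range cs.length).reverse.findSome? (pvDigitAt cs)
  first.getD 0 * 10 + last.getD 0

-- ===== PRECONDITION & SPEC =====
-- Pre_ excludes lines with no digit character and no digit word after stripping,
-- on which Python A raises IndexError (digits[0] of an empty list).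
def Pre_calibration_value2 (line : String) : Prop :=
  ((PySem.Chars.strip line.toList).any (fun c => pvStringDigits.contains c)
    || pvDigitNames.any (fun nm => PySem.Chars.isIn nm (PySem.Chars.strip line.toList))) = true
instance (line : String) : Decidable (Pre_calibration_value2 line) := by
  unfold Pre_calibration_value2; infer_instance

def pvWitness_calibration_value2 : String := "a1two"

def Spec_calibration_value2 (line : String) (out : Int) : Prop := out = calibration_value2_alt line
instance (line : String) (out : Int) : Decidable (Spec_calibration_value2 line out) := by
  unfold Spec_calibration_value2; infer_instance

-- ===== CLAIM (what is proved, stated in full; the proofs are below) =====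
def Claim_equal_calibration_value2 : Prop := ∀ (line : String), Dom_calibration_value2 line → Pre_calibration_value2 line → Spec_calibration_value2 line (calibration_value2 line)

-- ===== LEMMAS AND PROOFS =====

-- membership in '0123456789' is exactly the two comparisons B uses
theorem pvMemDigits (c : Char) : pvStringDigits.contains c = true ↔ ('0' ≤ c ∧ c ≤ '9') := by
  have hval : ∀ d : Char, c = d ↔ c.toNat = d.toNat := by
    intro d
    constructor
    · intro h; rw [h]
    · intro h; exact Char.ext (UInt32.toNat_inj.mp h)
  simp only [pvStringDigits, List.contains_eq_mem, List.mem_cons, List.not_mem_nil, or_false,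
    decide_eq_true_eq, Char.le_def, UInt32.le_iff_toNat_le, hval]
  have h0 : ('0' : Char).val.toNat = 48 := by decide
  have h9 : ('9' : Char).val.toNat = 57 := by decide
  rw [show ('0':Char).toNat = 48 from rfl, show ('1':Char).toNat = 49 from rfl,
    show ('2':Char).toNat = 50 from rfl, show ('3':Char).toNat = 51 from rfl,
    show ('4':Char).toNat = 52 from rfl, show ('5':Char).toNat = 53 from rfl,
    show ('6':Char).toNat = 54 from rfl, show ('7':Char).toNat = 55 from rfl,
    show ('8':Char).toNat = 56 from rfl, show ('9':Char).toNat = 57 from rfl, h0, h9]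
  show _ ↔ (48 ≤ c.val.toNat ∧ c.val.toNat ≤ 57)
  have : c.toNat = c.val.toNat := rfl
  omega

-- find t sub = 0 ↔ sub is a prefix of t
theorem pvFindZero (t sub : List Char) : PySem.Chars.find t sub = 0 ↔ sub <+: t := by
  constructor
  · intro h
    have h0 : 0 ≤ PySem.Chars.find t sub := by rw [h]
    have := (PySem.Chars.find_spec h0).1
    rw [h] at this
    simpa using this
  · intro h
    have h0 : 0 ≤ PySem.Chars.find t sub :=
      (PySem.Chars.find_nonneg_iff t sub).mpr h.isInfix
    obtain ⟨_, hmin⟩ := PySem.Chars.find_spec h0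
    by_contra hne
    have hpos : 0 < (PySem.Chars.find t sub).toNat := by omega
    exact hmin 0 hpos (by simpa using h)

-- A's inner loop over a 5-char slice agrees with B's startswith scan
theorem pvInnerEq (names : List (List Char)) (h : ∀ nm ∈ names, nm.length ≤ 5)
    (k : Int) (s : List Char) :
    pvInnerA (PySem.List.enumerate names k) (s.take 5) = pvFindName (k + 1) names s := by
  induction names generalizing k with
  | nil => simp [PySem.List.enumerate, pvInnerA, pvFindName]
  | cons nm tl ih =>
    rw [PySem.List.enumerate_cons]
    show pvInnerA ((k, nm) :: PySem.List.enumerate tl (k + 1)) (s.take 5) = _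
    rw [pvInnerA, pvFindName]
    have hcond : (PySem.Chars.find (s.take 5) nm = 0) ↔ (PySem.Chars.startswith s nm = true) := by
      rw [pvFindZero, PySem.Chars.startswith_iff, List.prefix_take_iff]
      exact ⟨fun hp => hp.1, fun hp => ⟨hp, h nm (by simp)⟩⟩
    by_cases hc : PySem.Chars.find (s.take 5) nm = 0
    · rw [if_pos hc, if_pos (hcond.mp hc)]
    · rw [if_neg hc, if_neg (fun hs => hc (hcond.mpr hs))]
      exact ih (fun nm' hm => h nm' (by simp [hm])) (k + 1)

-- pointwise: A's per-index extraction equals pvDigitAt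
theorem pvStepEq (cs : List Char) (digits : List Int) (idx : Nat) :
    (let char := (PySem.List.pyGet? cs (idx : Int)).getD ' '
     if pvStringDigits.contains char then
       digits ++ [((char.toNat : Int) - 48)]
     else
       let rest := PySem.List.slice cs (some (idx : Int)) (some ((idx : Int) + 5))
       match pvInnerA (PySem.List.enumerate pvDigitNames 0) rest with
       | some d => digits ++ [d]
       | none => digits)
    = match pvDigitAt cs idx with
      | some d => digits ++ [d]
      | none => digits := by
  unfold pvDigitAt
  set c := (PySem.List.pyGet? cs (idx : Int)).getD ' ' with hc
  have hslice : PySem.List.slice cs (some (idx : Int)) (some ((idx : Int) + 5))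
      = (cs.drop idx).take 5 := by
    have := PySem.List.slice_natCast_add cs idx 5
    simpa using this
  by_cases hd : pvStringDigits.contains c = true
  · simp only [hd, if_true, if_pos ((pvMemDigits c).mp hd)]
  · simp only [hd, if_false, Bool.false_eq_true,
      if_neg (fun hp => hd ((pvMemDigits c).mpr hp))]
    rw [hslice]
    rw [show (1 : Int) = 0 + 1 from rfl, ← pvInnerEq pvDigitNames (by decide) 0 (cs.drop idx)]

theorem pvFoldFilterMap {α : Type} (f : α → Option Int) (l : List α) (init : List Int) :
    l.foldl (fun acc i => match f i with | some d => acc ++ [d] | none => acc) init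
      = init ++ l.filterMap f := by
  induction l generalizing init with
  | nil => simp
  | cons hd tl ih =>
    rw [List.foldl_cons, List.filterMap_cons]
    cases hf : f hd with
    | none => simp only []; exact ih init
    | some d => simp only [ih (init ++ [d]), List.append_assoc, List.singleton_append]

theorem pvFindSomeHead {α β : Type} (f : α → Option β) (l : List α) :
    l.findSome? f = (l.filterMap f).head? := by
  induction l with
  | nil => simp
  | cons hd tl ih =>
    rw [List.findSome?_cons, List.filterMap_cons]
    cases hf : f hd with
    | none => exact ih
    | some b => simp

theorem calibration_value2_spec : Claim_equal_calibration_value2 := by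
  intro line _ _
  unfold Spec_calibration_value2 calibration_value2 calibration_value2_alt
  simp only []
  set cs := PySem.Chars.strip line.toList with hcs
  have hstep : (fun (digits : List Int) (idx : Nat) =>
      if pvStringDigits.contains ((PySem.List.pyGet? cs (idx : Int)).getD ' ') = true then
        digits ++ [((((PySem.List.pyGet? cs (idx : Int)).getD ' ').toNat : Int) - 48)]
      else
        match pvInnerA (PySem.List.enumerate pvDigitNames 0)
            (PySem.List.slice cs (some (idx : Int)) (some ((idx : Int) + 5))) with
        | some d => digits ++ [d]
        | none => digits)
      = fun digits idx => match pvDigitAt cs idx with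
        | some d => digits ++ [d]
        | none => digits := by
    funext digits idx
    exact pvStepEq cs digits idx
  rw [hstep, pvFoldFilterMap, pvFindSomeHead, pvFindSomeHead, List.filterMap_reverse,
    List.head?_reverse, List.nil_append, PySem.List.pyGet?_zero, PySem.List.pyGet?_neg_one,
    ← List.head?_eq_getElem?]
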